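-- pv_equiv track=rewrite | github.com/chestnutforestlabo/LaTeX_Reference_Formatter | process_bib.py | unify_entry_fields
-- ===== SOURCE A (Python) =====
-- from collections import defaultdict
--
-- def unify_entry_fields(entries):
--     # Collect all fields used in each category
--     category_fields = defaultdict(set)
--     for entry in entries:
--         entry_type = entry.get('ENTRYTYPE', '').lower()
--         fields = set(entry.keys()) - {'ID', 'ENTRYTYPE'}
--         category_fields[entry_type].update(fields)
--     # Ensure each entry has all fields for its category
--     for entry in entries:
--         entry_type = entry.get('ENTRYTYPE', '').lower()
--         all_fields = category_fields[entry_type]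
--         for field in all_fields:
--             if field not in entry:
--                 entry[field] = ''  # Add missing field with empty value
--     return category_fields
-- ===== SOURCE B (Python) =====
-- from collections import defaultdict
--
-- def unify_entry_fields(entries):
--     # Distinct categories in first-appearance order; no accumulator dict of sets.
--     types = list(dict.fromkeys(e.get('ENTRYTYPE', '').lower() for e in entries))
--     category_fields = defaultdict(set)
--     # Per category: a brute-force re-scan of the flat entry list computes the
--     # field union directly, then a second scan fills that category's entries.
--     for t in types:
--         merged = set()
--         for e in entries:
--             if e.get('ENTRYTYPE', '').lower() == t:
--                 merged |= e.keys() - {'ID', 'ENTRYTYPE'}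
--         category_fields[t] = merged
--         for e in entries:
--             if e.get('ENTRYTYPE', '').lower() == t:
--                 for f in merged:
--                     if f not in e:
--                         e[f] = ''
--     return category_fields
-- ===== Notes on version B (the rewrite author's own statement) =====
-- stated objective: alternative
-- what changed: B drops A's hash-accumulated dict of sets: it first extracts the distinct lowercased categories in first-appearance order (dict.fromkeys), then for each category brute-force re-scans the flat entry list to union its fields and fill its entries, a nested-scan algorithm (O(T*n)) instead of A's single-pass dict accumulation.
import Mathlib
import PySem

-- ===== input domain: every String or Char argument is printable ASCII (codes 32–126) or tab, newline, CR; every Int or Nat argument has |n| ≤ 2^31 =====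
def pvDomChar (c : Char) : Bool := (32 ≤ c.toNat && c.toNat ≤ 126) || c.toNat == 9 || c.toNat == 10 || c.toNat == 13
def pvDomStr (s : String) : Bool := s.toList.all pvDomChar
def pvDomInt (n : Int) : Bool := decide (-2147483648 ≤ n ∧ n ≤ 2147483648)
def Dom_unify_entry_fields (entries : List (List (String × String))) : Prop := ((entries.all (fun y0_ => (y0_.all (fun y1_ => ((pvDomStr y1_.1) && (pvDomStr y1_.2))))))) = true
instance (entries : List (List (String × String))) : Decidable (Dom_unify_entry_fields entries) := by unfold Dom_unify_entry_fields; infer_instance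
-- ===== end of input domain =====

-- B replaces A's single-pass hash accumulation by distinct-categories-then-nested-rescans
-- (alternative decomposition, same result). Both Pythons also mutate the caller's entries in
-- place (adding missing fields with ''); the equivalence proved here is about the RETURN value only.

-- ===== PORT A =====
-- entry.get('ENTRYTYPE', '').lower()
def pvEntryType (entry : List (String × String)) : String :=
  PySem.Str.lower ((PySem.Dict.ofList entry).getD "ENTRYTYPE" "")

-- set(entry.keys()) - {'ID', 'ENTRYTYPE'}
def pvFields (entry : List (String × String)) : PySem.Set String :=
  PySem.Set.diff (PySem.Set.ofList (PySem.Dict.keys (PySem.Dict.ofList entry)))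
    (PySem.Set.ofList ["ID", "ENTRYTYPE"])

-- A's second loop only mutates the caller's entries (it never changes category_fields, every
-- entry's type is already a key after the first loop); the returned dict is built by the first loop.
def unify_entry_fields (entries : List (List (String × String))) : List (String × List String) :=
  (entries.foldl
    (fun category_fields entry =>
      category_fields.modify (pvEntryType entry) PySem.Set.empty
        (fun s => PySem.Set.update s (pvFields entry)))
    PySem.Dict.empty).items

-- ===== PORT B =====
-- types = list(dict.fromkeys(e.get('ENTRYTYPE','').lower() for e in entries))
-- then for each t: merged = union over entries with that type (inner if-scan over the flat list);
-- category_fields[t] = merged. (The second inner scan only mutates the caller's entries.)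
def unify_entry_fields_alt (entries : List (List (String × String))) : List (String × List String) :=
  let types : List String := PySem.List.dedup (entries.map pvEntryType)
  (types.foldl
    (fun category_fields t =>
      category_fields.insert t
        (entries.foldl
          (fun merged e =>
            if pvEntryType e == t then PySem.Set.update merged (pvFields e) else merged)
          PySem.Set.empty))
    PySem.Dict.empty).items

-- ===== PRECONDITION & SPEC =====
def Spec_unify_entry_fields (entries : List (List (String × String))) (out : List (String × List String)) : Prop := out = unify_entry_fields_alt entries
instance (entries : List (List (String × String))) (out : List (String × List String)) : Decidable (Spec_unify_entry_fields entries out) := by unfold Spec_unify_entry_fields; infer_instance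

-- ===== CLAIM (what is proved, stated in full; the proofs are below) =====
def Claim_equal_unify_entry_fields : Prop := ∀ (entries : List (List (String × String))), Dom_unify_entry_fields entries → Spec_unify_entry_fields entries (unify_entry_fields entries)

-- ===== LEMMAS AND PROOFS =====

-- A modify-loop keyed by `key` seen through getD is a fold over the matching elements.
theorem pv_getD_foldl_modify {κ ν β : Type} [BEq κ] [LawfulBEq κ] [DecidableEq κ]
    (key : β → κ) (d0 : ν) (upd : ν → β → ν) (l : List β) (d : PySem.Dict κ ν) (t : κ) :
    (l.foldl (fun d e => d.modify (key e) d0 (fun s => upd s e)) d).getD t d0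
      = (l.filter (fun e => key e == t)).foldl upd (d.getD t d0) := by
  induction l generalizing d with
  | nil => rfl
  | cons e l ih =>
    simp only [List.foldl_cons, List.filter_cons]
    rw [ih]
    by_cases h : key e = t
    · simp [h]
    · simp [h, PySem.Dict.getD_modify, Ne.symm h]

theorem unify_entry_fields_spec : Claim_equal_unify_entry_fields := by
  unfold Claim_equal_unify_entry_fields Spec_unify_entry_fields
  intro entries _
  unfold unify_entry_fields unify_entry_fields_alt
  set cfA := entries.foldl
      (fun category_fields entry =>
        category_fields.modify (pvEntryType entry) PySem.Set.empty
          (fun s => PySem.Set.update s (pvFields entry)))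
      PySem.Dict.empty with hcfA
  have hanodup : cfA.keys.Nodup := by
    rw [hcfA]
    exact PySem.Dict.nodup_keys_foldl_modify_key entries pvEntryType PySem.Set.empty
      (fun _ e s => PySem.Set.update s (pvFields e)) PySem.Dict.empty (by simp [PySem.Dict.keys_empty])
  have hkeys : cfA.keys = PySem.List.dedup (entries.map pvEntryType) := by
    rw [hcfA,
      PySem.Dict.keys_foldl_modify_key entries pvEntryType PySem.Set.empty
        (fun _ e s => PySem.Set.update s (pvFields e)) PySem.Dict.empty]
    simp [PySem.Dict.keys_empty, PySem.Set.update_nil_left]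
  -- B's insert-loop runs over fresh distinct keys, so its items are a map over `types`
  rw [PySem.Dict.items_foldl_insert_fresh (PySem.List.dedup (entries.map pvEntryType))
        (fun t => t)
        (fun t => entries.foldl
          (fun merged e =>
            if pvEntryType e == t then PySem.Set.update merged (pvFields e) else merged)
          PySem.Set.empty)
        PySem.Dict.empty (fun _ _ => PySem.Dict.contains_empty _)
        (by simpa using PySem.List.nodup_dedup (entries.map pvEntryType))]
  rw [PySem.Dict.items_eq_map_keys cfA hanodup PySem.Set.empty, hkeys]
  rw [show (PySem.Dict.empty : PySem.Dict String (PySem.Set String)).items = [] from rfl, List.nil_append]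
  refine List.map_congr_left (fun t ht => ?_)
  have ha : cfA.getD t PySem.Set.empty
      = (entries.filter (fun e => pvEntryType e == t)).foldl
          (fun merged entry => PySem.Set.update merged (pvFields entry)) PySem.Set.empty := by
    rw [hcfA, pv_getD_foldl_modify pvEntryType PySem.Set.empty
          (fun s e => PySem.Set.update s (pvFields e)) entries PySem.Dict.empty t]
    rfl
  rw [ha, ← PySem.List.foldl_if_eq_foldl_filter]
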